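-- pv_equiv track=rewrite | github.com/AvinoamNukrai/Nonogram-Solver | nonogram.py | get_intersection_row
-- ===== SOURCE A (Python) =====
-- WHITE = 0
--
-- BLACK = 1
--
-- UNKNOWN = -1
--
-- def get_intersection_row(rows):
--     """The current function accepts a list of lists (all rows of the matrix)
--     and returns the cutting of the rows - a list of all common organs
--     located in the same places in all rows in some values in each"""
--     intersection_list = []
--     if rows:
--         for i in range(len(rows[0])):
--             temp_list = []
--             for row in rows:
--                 temp_list.append(row[i])
--             if sum(temp_list) == len(rows):
--                 intersection_list.append(BLACK)
--             elif sum(temp_list) == 0 and UNKNOWN not in temp_list: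
--                 intersection_list.append(WHITE)
--             else:
--                 intersection_list.append(UNKNOWN)
--         return intersection_list
--     return []
-- ===== SOURCE B (Python) =====
-- WHITE = 0
--
-- BLACK = 1
--
-- UNKNOWN = -1
--
-- def get_intersection_row(rows):
--     """Single pass over the rows: maintain, per column, a (running sum, saw UNKNOWN)
--     pair, then decide every column from its final pair."""
--     if not rows:
--         return []
--     acc = [(0, False)] * len(rows[0])
--     for row in rows:
--         acc = [(s + row[i], u or row[i] == UNKNOWN) for i, (s, u) in enumerate(acc)]
--     n = len(rows)
--     return [BLACK if s == n else (WHITE if s == 0 and not u else UNKNOWN) for s, u in acc]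
-- ===== Notes on version B (the rewrite author's own statement) =====
-- stated objective: alternative
-- what changed: A scans column-major, building each column as a temp list and summing it; B makes one row-major pass maintaining per-column (running sum, saw -1) accumulator pairs and then decides every column from its final pair, so the per-column temp lists and repeated sum() calls disappear.
import Mathlib
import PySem

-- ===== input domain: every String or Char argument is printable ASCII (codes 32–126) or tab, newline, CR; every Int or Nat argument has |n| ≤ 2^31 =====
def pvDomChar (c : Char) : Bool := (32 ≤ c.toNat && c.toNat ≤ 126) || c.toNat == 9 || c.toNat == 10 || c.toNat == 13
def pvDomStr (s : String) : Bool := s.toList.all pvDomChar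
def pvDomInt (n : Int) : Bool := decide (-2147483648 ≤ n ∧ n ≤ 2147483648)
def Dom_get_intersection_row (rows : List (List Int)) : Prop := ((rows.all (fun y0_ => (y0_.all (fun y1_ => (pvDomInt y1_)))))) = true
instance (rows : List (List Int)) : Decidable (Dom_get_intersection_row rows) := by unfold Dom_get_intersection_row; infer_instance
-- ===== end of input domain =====

-- B replaces A's column-major scan (temp list + sum per column) by one row-major
-- pass over per-column (running sum, saw -1) accumulator pairs; same values, same cost.

-- ===== PORT A =====
def get_intersection_row (rows : List (List Int)) : List Int :=
  if rows = [] then []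
  else
    (PySem.List.pyRange 0 ((rows.headD []).length : Int) 1).foldl (fun acc i =>
      let temp : List Int := rows.foldl (fun t row => t ++ [PySem.List.pyGetD row i 0]) []
      if temp.sum = (rows.length : Int) then acc ++ [1]
      else if temp.sum = 0 ∧ temp.contains (-1) = false then acc ++ [0]
      else acc ++ [-1]) []

-- ===== PORT B =====
-- one row of B's pass: update every column's (running sum, saw -1) pair
def pvStep (row : List Int) (acc : List (Int × Bool)) : List (Int × Bool) :=
  (PySem.List.enumerate acc 0).map (fun p =>
    (p.2.1 + PySem.List.pyGetD row p.1 0, p.2.2 || (PySem.List.pyGetD row p.1 0 == -1)))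

def get_intersection_row_alt (rows : List (List Int)) : List Int :=
  match rows with
  | [] => []
  | r0 :: _ =>
    let acc := rows.foldl (fun a row => pvStep row a) (List.replicate r0.length ((0 : Int), false))
    acc.map (fun p => if p.1 = (rows.length : Int) then 1
                      else if p.1 = 0 ∧ p.2 = false then 0 else -1)

-- ===== PRECONDITION & SPEC =====
-- Pre_ excludes exactly the ragged inputs on which Python A raises IndexError
-- (some row shorter than the first row).
def Pre_get_intersection_row (rows : List (List Int)) : Prop :=
  ∀ r ∈ rows, (rows.headD []).length ≤ r.length
instance (rows : List (List Int)) : Decidable (Pre_get_intersection_row rows) := by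
  unfold Pre_get_intersection_row; infer_instance

def pvWitness_get_intersection_row : List (List Int) := [[1, 0, -1], [1, 1, 0]]

def Spec_get_intersection_row (rows : List (List Int)) (out : List Int) : Prop := out = get_intersection_row_alt rows
instance (rows : List (List Int)) (out : List Int) : Decidable (Spec_get_intersection_row rows out) := by unfold Spec_get_intersection_row; infer_instance

-- ===== CLAIM (what is proved, stated in full; the proofs are below) =====
def Claim_equal_get_intersection_row : Prop := ∀ (rows : List (List Int)), Dom_get_intersection_row rows → Pre_get_intersection_row rows → Spec_get_intersection_row rows (get_intersection_row rows)

-- ===== LEMMAS AND PROOFS =====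

-- column access
def pvG (i : Int) (row : List Int) : Int := PySem.List.pyGetD row i 0

lemma pvStep_map (row : List Int) (n : Nat) (f : Int → Int × Bool) :
    pvStep row ((PySem.List.pyRange 0 (n : Int) 1).map f)
      = (PySem.List.pyRange 0 (n : Int) 1).map
          (fun i => ((f i).1 + pvG i row, (f i).2 || (pvG i row == -1))) := by
  unfold pvStep
  rw [PySem.List.enumerate_eq_map_pyRange _ (((0 : Int), false))]
  simp only [PySem.List.len_eq, List.length_map, PySem.List.length_pyRange_one, Int.sub_zero,
    Int.toNat_natCast, List.map_map]
  refine List.map_congr_left ?_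
  intro j hj
  rcases (PySem.List.mem_pyRange_one).mp hj with ⟨h0, h1⟩
  simp [Function.comp, PySem.List.pyGetD_map_pyRange_of_nonneg f (n : Int) j _ h0 h1, pvG]

lemma pvFold_char (rs : List (List Int)) (n : Nat) (f : Int → Int × Bool) :
    rs.foldl (fun a row => pvStep row a) ((PySem.List.pyRange 0 (n : Int) 1).map f)
      = (PySem.List.pyRange 0 (n : Int) 1).map
          (fun i => ((f i).1 + (rs.map (pvG i)).sum,
                     (f i).2 || (rs.map (pvG i)).any (· == -1))) := by
  induction rs generalizing f with
  | nil => simp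
  | cons r rs ih =>
    rw [List.foldl_cons, pvStep_map, ih]
    refine List.map_congr_left ?_
    intro j hj
    simp [Bool.or_assoc, add_assoc]

lemma pv_A_eq (rows : List (List Int)) :
    get_intersection_row rows = get_intersection_row_alt rows := by
  cases rows with
  | nil => rfl
  | cons r0 rs =>
    unfold get_intersection_row get_intersection_row_alt
    simp only [if_neg (List.cons_ne_nil r0 rs), List.headD_cons]
    -- A: the outer append-singleton loop is a map over the column indices
    have hA : (fun (acc : List Int) (i : Int) =>
        let temp : List Int := (r0 :: rs).foldl (fun t row => t ++ [PySem.List.pyGetD row i 0]) []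
        if temp.sum = ((r0 :: rs).length : Int) then acc ++ [1]
        else if temp.sum = 0 ∧ temp.contains (-1) = false then acc ++ [0]
        else acc ++ [-1])
      = (fun acc i => acc ++
          [let temp : List Int := (r0 :: rs).foldl (fun t row => t ++ [PySem.List.pyGetD row i 0]) []
           if temp.sum = ((r0 :: rs).length : Int) then 1
           else if temp.sum = 0 ∧ temp.contains (-1) = false then 0 else -1]) := by
      funext acc i; simp only []; split_ifs <;> rfl
    rw [hA, PySem.List.foldl_append_singleton_eq_map]
    -- B: initial accumulator as a map over the same index range
    have hB : List.replicate r0.length ((0 : Int), false)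
        = (PySem.List.pyRange 0 (r0.length : Int) 1).map (fun _ => ((0 : Int), false)) := by
      rw [List.map_const', PySem.List.length_pyRange_one]
      simp
    rw [hB, pvFold_char, List.map_map, List.nil_append]
    refine List.map_congr_left ?_
    intro i hi
    have htemp : (r0 :: rs).foldl (fun t row => t ++ [PySem.List.pyGetD row i 0]) ([] : List Int)
        = (r0 :: rs).map (pvG i) := by
      simpa [pvG] using PySem.List.foldl_append_singleton_eq_map (l := r0 :: rs)
        (f := fun row => PySem.List.pyGetD row i 0) (acc := [])
    simp only [htemp, Function.comp, zero_add, Bool.false_or]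
    have hcon : ((r0 :: rs).map (pvG i)).contains (-1)
        = ((r0 :: rs).map (pvG i)).any (· == -1) := by
      rw [List.contains_eq_any_beq]
      have h : ∀ x : Int, ((-1 : Int) == x) = (x == -1) := by
        intro x; exact BEq.comm
      simp [h]
    rw [hcon]

theorem get_intersection_row_spec : Claim_equal_get_intersection_row := by
  intro rows _ _
  unfold Spec_get_intersection_row
  exact pv_A_eq rows
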